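-- pv_equiv track=rewrite | github.com/kitt6071/work | batch_ingesting.py | parse_wikispecies_rank_hierarchy
-- ===== SOURCE A (Python) =====
-- from typing import List, Tuple, Dict, Optional, Union
--
-- def parse_wikispecies_rank_hierarchy(rank_hierarchy_list: List[str]) -> Dict[str, Optional[str]]:
--     """
--     Parses the rank_hierarchy list from Wikispecies data into a standardized dictionary.
--     """
--     parsed_ranks = {
--         "kingdom": None, "phylum": None, "class": None, "order": None,
--         "family": None, "genus": None, "species": None
--     }
--     ws_to_standard_keys = {
--         "superregnum": "kingdom", "regnum": "kingdom", "phylum": "phylum",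
--         "subphylum": "phylum", "classis": "class", "subclassis": "class",
--         "ordo": "order", "familia": "family", "genus": "genus", "species": "species"
--     }
--     temp_class_values = []
--     temp_kingdom_values = {}
--
--     for item_str in rank_hierarchy_list:
--         if ':' not in item_str:
--             continue
--         try:
--             rank_label_ws, rank_value_ws = item_str.split(':', 1)
--         except ValueError:
--             continue # Skip lines not in key:value format
--         rank_label_ws_lower = rank_label_ws.strip().lower()
--         rank_value_ws_stripped = rank_value_ws.strip()
--
--         standard_key = ws_to_standard_keys.get(rank_label_ws_lower)
--         if standard_key:
--             if standard_key == "class":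
--                 temp_class_values.append(rank_value_ws_stripped)
--             elif standard_key == "kingdom":
--                 temp_kingdom_values[rank_label_ws_lower] = rank_value_ws_stripped
--             elif standard_key == "phylum":
--                 if rank_label_ws_lower == "phylum" or not parsed_ranks.get(standard_key):
--                     parsed_ranks[standard_key] = rank_value_ws_stripped
--             elif standard_key == "species":
--                 # Species entry in WS hierarchy is often "Genus species_epithet"
--                 # We want to store the full string, e.g., "Tanysiptera sylvia"
--                 parsed_ranks[standard_key] = rank_value_ws_stripped
--             else:
--                 parsed_ranks[standard_key] = rank_value_ws_stripped
--
--     if 'regnum' in temp_kingdom_values: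
--         parsed_ranks["kingdom"] = temp_kingdom_values['regnum']
--     elif 'superregnum' in temp_kingdom_values:
--         parsed_ranks["kingdom"] = temp_kingdom_values['superregnum']
--
--     aves_class_value = None
--     for cv in temp_class_values:
--         if "aves" in cv.lower():
--             aves_class_value = cv
--             break
--     if aves_class_value:
--         parsed_ranks["class"] = aves_class_value
--     elif temp_class_values:
--         parsed_ranks["class"] = temp_class_values[-1]
--
--     return parsed_ranks
-- ===== SOURCE B (Python) =====
-- from typing import List, Dict, Optional
--
-- _WS_TO_STD = {
--     "superregnum": "kingdom", "regnum": "kingdom", "phylum": "phylum",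
--     "subphylum": "phylum", "classis": "class", "subclassis": "class",
--     "ordo": "order", "familia": "family", "genus": "genus", "species": "species"
-- }
--
-- def _prep(item):
--     if ':' not in item:
--         return None
--     label, value = item.split(':', 1)
--     label = label.strip().lower()
--     std = _WS_TO_STD.get(label)
--     if std is None:
--         return None
--     return (std, label, value.strip())
--
-- def parse_wikispecies_rank_hierarchy(rank_hierarchy_list: List[str]) -> Dict[str, Optional[str]]:
--     pairs = [t for t in map(_prep, rank_hierarchy_list) if t is not None]
--
--     def last(vs):
--         return vs[-1] if vs else None
--
--     def last_of_field(field):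
--         return last([v for s, _, v in pairs if s == field])
--
--     reg = last([v for _, l, v in pairs if l == 'regnum'])
--     sup = last([v for _, l, v in pairs if l == 'superregnum'])
--     kingdom = sup if reg is None else reg
--
--     phylum = None
--     for _, l, v in pairs:
--         if l == 'phylum' or (l == 'subphylum' and not phylum):
--             phylum = v
--
--     cvs = [v for s, _, v in pairs if s == 'class']
--     cls = next((v for v in cvs if 'aves' in v.lower()), last(cvs))
--
--     return {"kingdom": kingdom, "phylum": phylum, "class": cls,
--             "order": last_of_field("order"), "family": last_of_field("family"),
--             "genus": last_of_field("genus"), "species": last_of_field("species")}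
-- ===== Notes on version B (the rewrite author's own statement) =====
-- stated objective: alternative
-- what changed: Replaces A's single stateful loop (mutable dict plus two temp accumulators and post-loop fixups) by one preprocessing pass that maps items to (standard-field, label, value) triples followed by independent per-field reductions (last regnum-over-superregnum, the phylum/subphylum rule, first aves-containing class else last, last value for the simple fields).
import Mathlib
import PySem

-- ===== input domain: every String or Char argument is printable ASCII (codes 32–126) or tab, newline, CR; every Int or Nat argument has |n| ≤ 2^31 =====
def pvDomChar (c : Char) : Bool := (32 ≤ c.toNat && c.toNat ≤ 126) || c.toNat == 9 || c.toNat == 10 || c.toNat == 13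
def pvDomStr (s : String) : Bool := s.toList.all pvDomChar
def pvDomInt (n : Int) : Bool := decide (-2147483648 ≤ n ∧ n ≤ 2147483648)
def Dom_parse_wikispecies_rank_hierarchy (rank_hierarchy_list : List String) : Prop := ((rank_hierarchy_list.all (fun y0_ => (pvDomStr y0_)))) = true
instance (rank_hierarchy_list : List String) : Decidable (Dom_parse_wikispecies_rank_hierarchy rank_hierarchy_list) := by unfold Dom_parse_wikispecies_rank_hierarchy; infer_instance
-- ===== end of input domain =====

-- B replaces A's single stateful loop (mutable result dict + two temp accumulators + post-loop
-- fixups) by a preprocessing pass into (standard-field, label, value) triples followed by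
-- independent per-field reductions; same cost, different decomposition (objective: alternative).

-- ===== PORT A =====
def pvTruthyA (o : Option String) : Bool :=
  match o with
  | none => false
  | some s => !(s == "")

def pvWsKeysA : PySem.Dict String String :=
  PySem.Dict.ofList [("superregnum","kingdom"),("regnum","kingdom"),("phylum","phylum"),
    ("subphylum","phylum"),("classis","class"),("subclassis","class"),
    ("ordo","order"),("familia","family"),("genus","genus"),("species","species")]

-- one iteration of A's for-loop; state = (parsed_ranks, temp_class_values, temp_kingdom_values)
def pvAStep (st : PySem.Dict String (Option String) × List String × PySem.Dict String String)
    (item_str : String) : PySem.Dict String (Option String) × List String × PySem.Dict String String :=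
  let (parsed, tempClass, tempKingdom) := st
  if PySem.Str.isIn ":" item_str then
    match (PySem.Str.splitMax? item_str ":" 1).getD [] with
    | [rank_label_ws, rank_value_ws] =>
      let lbl := PySem.Str.lower (PySem.Str.strip rank_label_ws)
      let v := PySem.Str.strip rank_value_ws
      match pvWsKeysA.get? lbl with
      | some standard_key =>
        if !(standard_key == "") then    -- Python truthiness of `standard_key`
          if standard_key == "class" then (parsed, tempClass ++ [v], tempKingdom)
          else if standard_key == "kingdom" then (parsed, tempClass, tempKingdom.insert lbl v)
          else if standard_key == "phylum" then
            if lbl == "phylum" || !pvTruthyA ((parsed.get? standard_key).getD none) then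
              (parsed.insert standard_key (some v), tempClass, tempKingdom)
            else (parsed, tempClass, tempKingdom)
          else if standard_key == "species" then (parsed.insert standard_key (some v), tempClass, tempKingdom)
          else (parsed.insert standard_key (some v), tempClass, tempKingdom)
        else (parsed, tempClass, tempKingdom)
      | none => (parsed, tempClass, tempKingdom)
    | _ => (parsed, tempClass, tempKingdom)   -- `except ValueError: continue` (unreachable)
  else (parsed, tempClass, tempKingdom)

def parse_wikispecies_rank_hierarchy (rank_hierarchy_list : List String) : List (String × Option String) :=
  let parsed0 : PySem.Dict String (Option String) := PySem.Dict.ofList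
    [("kingdom", none), ("phylum", none), ("class", none), ("order", none),
     ("family", none), ("genus", none), ("species", none)]
  let st := rank_hierarchy_list.foldl pvAStep (parsed0, [], PySem.Dict.empty)
  let parsed := st.1
  let tempClass := st.2.1
  let tempKingdom := st.2.2
  let parsed :=
    match tempKingdom.get? "regnum" with
    | some v => parsed.insert "kingdom" (some v)
    | none =>
      match tempKingdom.get? "superregnum" with
      | some v => parsed.insert "kingdom" (some v)
      | none => parsed
  -- first-match-then-break loop over temp_class_values
  let aves_class_value := tempClass.find? (fun cv => PySem.Str.isIn "aves" (PySem.Str.lower cv))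
  let parsed :=
    match aves_class_value with
    | some av =>
      if !(av == "") then parsed.insert "class" (some av)
      else match tempClass.getLast? with
           | some w => parsed.insert "class" (some w)
           | none => parsed
    | none =>
      match tempClass.getLast? with
      | some w => parsed.insert "class" (some w)
      | none => parsed
  parsed.items

-- ===== PORT B =====
def pvWsToStdB : PySem.Dict String String :=
  PySem.Dict.ofList [("superregnum","kingdom"),("regnum","kingdom"),("phylum","phylum"),
    ("subphylum","phylum"),("classis","class"),("subclassis","class"),
    ("ordo","order"),("familia","family"),("genus","genus"),("species","species")]

def pvPrepB (item : String) : Option (String × String × String) :=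
  if PySem.Str.isIn ":" item then
    match (PySem.Str.splitMax? item ":" 1).getD [] with
    | [label0, value0] =>
      let label := PySem.Str.lower (PySem.Str.strip label0)
      match pvWsToStdB.get? label with
      | some std => some (std, label, PySem.Str.strip value0)
      | none => none
    | _ => none
  else none

def pvTruthyB (o : Option String) : Bool :=
  match o with
  | none => false
  | some s => !(s == "")

def pvLastB (vs : List String) : Option String := vs.getLast?

def parse_wikispecies_rank_hierarchy_alt (rank_hierarchy_list : List String) : List (String × Option String) :=
  let pairs := rank_hierarchy_list.filterMap pvPrepB
  let lastOfField := fun (field : String) =>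
    pvLastB (pairs.filterMap (fun t => if t.1 == field then some t.2.2 else none))
  let reg := pvLastB (pairs.filterMap (fun t => if t.2.1 == "regnum" then some t.2.2 else none))
  let sup := pvLastB (pairs.filterMap (fun t => if t.2.1 == "superregnum" then some t.2.2 else none))
  let kingdom := match reg with | some v => some v | none => sup
  let phylum := pairs.foldl
    (fun ph t => if t.2.1 == "phylum" || (t.2.1 == "subphylum" && !pvTruthyB ph) then some t.2.2 else ph)
    none
  let cvs := pairs.filterMap (fun t => if t.1 == "class" then some t.2.2 else none)
  let cls := match cvs.find? (fun v => PySem.Str.isIn "aves" (PySem.Str.lower v)) with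
             | some v => some v
             | none => pvLastB cvs
  [("kingdom", kingdom), ("phylum", phylum), ("class", cls),
   ("order", lastOfField "order"), ("family", lastOfField "family"),
   ("genus", lastOfField "genus"), ("species", lastOfField "species")]

-- ===== PRECONDITION & SPEC =====
def Spec_parse_wikispecies_rank_hierarchy (rank_hierarchy_list : List String) (out : List (String × Option String)) : Prop := out = parse_wikispecies_rank_hierarchy_alt rank_hierarchy_list
instance (rank_hierarchy_list : List String) (out : List (String × Option String)) : Decidable (Spec_parse_wikispecies_rank_hierarchy rank_hierarchy_list out) := by unfold Spec_parse_wikispecies_rank_hierarchy; infer_instance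

-- ===== CLAIM (what is proved, stated in full; the proofs are below) =====
def Claim_equal_parse_wikispecies_rank_hierarchy : Prop := ∀ (rank_hierarchy_list : List String), Dom_parse_wikispecies_rank_hierarchy rank_hierarchy_list → Spec_parse_wikispecies_rank_hierarchy rank_hierarchy_list (parse_wikispecies_rank_hierarchy rank_hierarchy_list)

-- ===== LEMMAS AND PROOFS =====

-- proof-side vocabulary
def pvMk7 (k p c o f g sp : Option String) : PySem.Dict String (Option String) :=
  ⟨[("kingdom", k), ("phylum", p), ("class", c), ("order", o),
    ("family", f), ("genus", g), ("species", sp)]⟩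

def pvStep' (st : PySem.Dict String (Option String) × List String × PySem.Dict String String)
    (t : String × String × String) : PySem.Dict String (Option String) × List String × PySem.Dict String String :=
  let (parsed, tempClass, tempKingdom) := st
  let (std, lbl, v) := t
  if !(std == "") then
    if std == "class" then (parsed, tempClass ++ [v], tempKingdom)
    else if std == "kingdom" then (parsed, tempClass, tempKingdom.insert lbl v)
    else if std == "phylum" then
      if lbl == "phylum" || !pvTruthyA ((parsed.get? std).getD none) then
        (parsed.insert std (some v), tempClass, tempKingdom)
      else (parsed, tempClass, tempKingdom)
    else if std == "species" then (parsed.insert std (some v), tempClass, tempKingdom)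
    else (parsed.insert std (some v), tempClass, tempKingdom)
  else (parsed, tempClass, tempKingdom)

def pvValid (t : String × String × String) : Prop := pvWsKeysA.get? t.2.1 = some t.1

def pvStdVals (s : String) (ps : List (String × String × String)) : List String :=
  ps.filterMap (fun t => if t.1 == s then some t.2.2 else none)

def pvLabVals (l : String) (ps : List (String × String × String)) : List String :=
  ps.filterMap (fun t => if t.2.1 == l then some t.2.2 else none)

def pvLastOr (vs : List String) (d : Option String) : Option String :=
  match vs.getLast? with
  | some v => some v
  | none => d

def pvPhyAcc (p : Option String) (ps : List (String × String × String)) : Option String :=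
  ps.foldl (fun ph t => if t.2.1 == "phylum" || (t.2.1 == "subphylum" && !pvTruthyB ph) then some t.2.2 else ph) p

lemma pvAStep_eq (st : PySem.Dict String (Option String) × List String × PySem.Dict String String)
    (item : String) : pvAStep st item = (pvPrepB item).elim st (pvStep' st) := by
  obtain ⟨parsed, cl, kd⟩ := st
  unfold pvAStep pvPrepB
  by_cases h : PySem.Str.isIn ":" item
  · simp only [h, if_pos]
    cases hsp : (PySem.Str.splitMax? item ":" 1).getD [] with
    | nil => simp
    | cons a rest =>
      cases rest with
      | nil => simp
      | cons b rest2 =>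
        cases rest2 with
        | nil =>
          have hdict : pvWsToStdB = pvWsKeysA := rfl
          cases hg : pvWsKeysA.get? (PySem.Str.lower (PySem.Str.strip a)) with
          | none => simp [hdict, hg]
          | some std => simp [hdict, hg, pvStep']
        | cons c rest3 => simp
  · simp only [PySem.Str.isIn_eq, show (":":String).toList = [':'] from rfl] at h
    simp [h]

lemma pvPrepB_valid (item : String) (t : String × String × String)
    (h : pvPrepB item = some t) : pvValid t := by
  unfold pvPrepB at h
  by_cases hin : PySem.Str.isIn ":" item = true
  · rw [if_pos hin] at h
    cases hsp : (PySem.Str.splitMax? item ":" 1).getD [] with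
    | nil => rw [hsp] at h; simp at h
    | cons a rest =>
      rw [hsp] at h
      cases rest with
      | nil => simp at h
      | cons b rest2 =>
        cases rest2 with
        | nil =>
          cases hg : pvWsToStdB.get? (PySem.Str.lower (PySem.Str.strip a)) with
          | none => simp [hg] at h
          | some std =>
            simp [hg] at h
            subst h
            exact hg
        | cons c rest3 => simp at h
  · rw [if_neg hin] at h; simp at h

lemma pvValid_cases (s l v : String) (h : pvValid (s, l, v)) :
    (l = "superregnum" ∧ s = "kingdom") ∨ (l = "regnum" ∧ s = "kingdom") ∨
    (l = "phylum" ∧ s = "phylum") ∨ (l = "subphylum" ∧ s = "phylum") ∨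
    (l = "classis" ∧ s = "class") ∨ (l = "subclassis" ∧ s = "class") ∨
    (l = "ordo" ∧ s = "order") ∨ (l = "familia" ∧ s = "family") ∨
    (l = "genus" ∧ s = "genus") ∨ (l = "species" ∧ s = "species") := by
  unfold pvValid at h
  by_cases h0 : l = "superregnum"
  · subst h0
    have he : pvWsKeysA.get? "superregnum" = some "kingdom" := by decide
    rw [he] at h
    injection h with h'
    subst h'
    decide
  by_cases h1 : l = "regnum"
  · subst h1
    have he : pvWsKeysA.get? "regnum" = some "kingdom" := by decide
    rw [he] at h
    injection h with h'
    subst h'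
    decide
  by_cases h2 : l = "phylum"
  · subst h2
    have he : pvWsKeysA.get? "phylum" = some "phylum" := by decide
    rw [he] at h
    injection h with h'
    subst h'
    decide
  by_cases h3 : l = "subphylum"
  · subst h3
    have he : pvWsKeysA.get? "subphylum" = some "phylum" := by decide
    rw [he] at h
    injection h with h'
    subst h'
    decide
  by_cases h4 : l = "classis"
  · subst h4
    have he : pvWsKeysA.get? "classis" = some "class" := by decide
    rw [he] at h
    injection h with h'
    subst h'
    decide
  by_cases h5 : l = "subclassis"
  · subst h5
    have he : pvWsKeysA.get? "subclassis" = some "class" := by decide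
    rw [he] at h
    injection h with h'
    subst h'
    decide
  by_cases h6 : l = "ordo"
  · subst h6
    have he : pvWsKeysA.get? "ordo" = some "order" := by decide
    rw [he] at h
    injection h with h'
    subst h'
    decide
  by_cases h7 : l = "familia"
  · subst h7
    have he : pvWsKeysA.get? "familia" = some "family" := by decide
    rw [he] at h
    injection h with h'
    subst h'
    decide
  by_cases h8 : l = "genus"
  · subst h8
    have he : pvWsKeysA.get? "genus" = some "genus" := by decide
    rw [he] at h
    injection h with h'
    subst h'
    decide
  by_cases h9 : l = "species"
  · subst h9
    have he : pvWsKeysA.get? "species" = some "species" := by decide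
    rw [he] at h
    injection h with h'
    subst h'
    decide
  exfalso
  have hit : pvWsKeysA.items = [("superregnum","kingdom"),("regnum","kingdom"),("phylum","phylum"),
    ("subphylum","phylum"),("classis","class"),("subclassis","class"),
    ("ordo","order"),("familia","family"),("genus","genus"),("species","species")] := by decide
  have hn : List.find? (fun p => p.1 == l) pvWsKeysA.items = none := by
    rw [List.find?_eq_none]
    intro x hx
    rw [hit] at hx
    simp only [List.mem_cons, List.not_mem_nil, or_false] at hx
    rcases hx with rfl|rfl|rfl|rfl|rfl|rfl|rfl|rfl|rfl|rfl
    all_goals simp only [beq_iff_eq]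
    exacts [fun hh => h0 hh.symm, fun hh => h1 hh.symm, fun hh => h2 hh.symm, fun hh => h3 hh.symm, fun hh => h4 hh.symm, fun hh => h5 hh.symm, fun hh => h6 hh.symm, fun hh => h7 hh.symm, fun hh => h8 hh.symm, fun hh => h9 hh.symm]
  simp only [PySem.Dict.get?, hn, Option.map_none] at h
  simp at h

lemma pvLastOr_cons (v : String) (vs : List String) (d : Option String) :
    pvLastOr (v :: vs) d = pvLastOr vs (some v) := by
  unfold pvLastOr
  rw [List.getLast?_cons]
  cases h : vs.getLast? <;> simp [h]

lemma pvLastOr_none (vs : List String) : pvLastOr vs none = vs.getLast? := by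
  unfold pvLastOr
  cases h : vs.getLast? <;> simp [h]

lemma pvTruthyB_eq (o : Option String) : pvTruthyB o = pvTruthyA o := rfl

lemma pvStep'_class (parsed : PySem.Dict String (Option String)) (cl : List String)
    (kd : PySem.Dict String String) (l v : String) :
    pvStep' (parsed, cl, kd) ("class", l, v) = (parsed, cl ++ [v], kd) := by
  simp [pvStep']

lemma pvStep'_kingdom (parsed : PySem.Dict String (Option String)) (cl : List String)
    (kd : PySem.Dict String String) (l v : String) :
    pvStep' (parsed, cl, kd) ("kingdom", l, v) = (parsed, cl, kd.insert l v) := by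
  simp [pvStep']

lemma pvStep'_phylum (parsed : PySem.Dict String (Option String)) (cl : List String)
    (kd : PySem.Dict String String) (l v : String) :
    pvStep' (parsed, cl, kd) ("phylum", l, v) =
      (if l == "phylum" || !pvTruthyA ((parsed.get? "phylum").getD none) then
        (parsed.insert "phylum" (some v), cl, kd) else (parsed, cl, kd)) := by
  simp [pvStep']

lemma pvStep'_order (parsed : PySem.Dict String (Option String)) (cl : List String)
    (kd : PySem.Dict String String) (l v : String) :
    pvStep' (parsed, cl, kd) ("order", l, v) = (parsed.insert "order" (some v), cl, kd) := by
  simp [pvStep']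

lemma pvStep'_family (parsed : PySem.Dict String (Option String)) (cl : List String)
    (kd : PySem.Dict String String) (l v : String) :
    pvStep' (parsed, cl, kd) ("family", l, v) = (parsed.insert "family" (some v), cl, kd) := by
  simp [pvStep']

lemma pvStep'_genus (parsed : PySem.Dict String (Option String)) (cl : List String)
    (kd : PySem.Dict String String) (l v : String) :
    pvStep' (parsed, cl, kd) ("genus", l, v) = (parsed.insert "genus" (some v), cl, kd) := by
  simp [pvStep']

lemma pvStep'_species (parsed : PySem.Dict String (Option String)) (cl : List String)
    (kd : PySem.Dict String String) (l v : String) :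
    pvStep' (parsed, cl, kd) ("species", l, v) = (parsed.insert "species" (some v), cl, kd) := by
  simp [pvStep']

lemma pvMk7_ins_kingdom (k p c o f g sp x : Option String) :
    (pvMk7 k p c o f g sp).insert "kingdom" x = pvMk7 x p c o f g sp := by
  simp [pvMk7, PySem.Dict.insert, PySem.Dict.contains]

lemma pvMk7_ins_phylum (k p c o f g sp x : Option String) :
    (pvMk7 k p c o f g sp).insert "phylum" x = pvMk7 k x c o f g sp := by
  simp [pvMk7, PySem.Dict.insert, PySem.Dict.contains]

lemma pvMk7_ins_class (k p c o f g sp x : Option String) :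
    (pvMk7 k p c o f g sp).insert "class" x = pvMk7 k p x o f g sp := by
  simp [pvMk7, PySem.Dict.insert, PySem.Dict.contains]

lemma pvMk7_ins_order (k p c o f g sp x : Option String) :
    (pvMk7 k p c o f g sp).insert "order" x = pvMk7 k p c x f g sp := by
  simp [pvMk7, PySem.Dict.insert, PySem.Dict.contains]

lemma pvMk7_ins_family (k p c o f g sp x : Option String) :
    (pvMk7 k p c o f g sp).insert "family" x = pvMk7 k p c o x g sp := by
  simp [pvMk7, PySem.Dict.insert, PySem.Dict.contains]

lemma pvMk7_ins_genus (k p c o f g sp x : Option String) :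
    (pvMk7 k p c o f g sp).insert "genus" x = pvMk7 k p c o f x sp := by
  simp [pvMk7, PySem.Dict.insert, PySem.Dict.contains]

lemma pvMk7_ins_species (k p c o f g sp x : Option String) :
    (pvMk7 k p c o f g sp).insert "species" x = pvMk7 k p c o f g x := by
  simp [pvMk7, PySem.Dict.insert, PySem.Dict.contains]

lemma pvMk7_get_phylum (k p c o f g sp : Option String) :
    (pvMk7 k p c o f g sp).get? "phylum" = some p := by
  simp [pvMk7, PySem.Dict.get?, List.find?]

lemma pvStdVals_cons (s : String) (t : String × String × String) (ps : List (String × String × String)) :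
    pvStdVals s (t :: ps) = if t.1 == s then t.2.2 :: pvStdVals s ps else pvStdVals s ps := by
  unfold pvStdVals
  rw [List.filterMap_cons]
  by_cases h : t.1 == s <;> simp [h]

lemma pvLabVals_cons (l : String) (t : String × String × String) (ps : List (String × String × String)) :
    pvLabVals l (t :: ps) = if t.2.1 == l then t.2.2 :: pvLabVals l ps else pvLabVals l ps := by
  unfold pvLabVals
  rw [List.filterMap_cons]
  by_cases h : t.2.1 == l <;> simp [h]

lemma pvPhyAcc_cons (p : Option String) (t : String × String × String) (ps : List (String × String × String)) :
    pvPhyAcc p (t :: ps) =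
      pvPhyAcc (if t.2.1 == "phylum" || (t.2.1 == "subphylum" && !pvTruthyB p) then some t.2.2 else p) ps := rfl

lemma pvMk7_items (k p c o f g sp : Option String) :
    (pvMk7 k p c o f g sp).items = [("kingdom", k), ("phylum", p), ("class", c), ("order", o),
      ("family", f), ("genus", g), ("species", sp)] := rfl

-- A's loop over valid triples, with fully generalized state
lemma pvFold_inv (ps : List (String × String × String)) (hv : ∀ t ∈ ps, pvValid t) :
    ∀ (k p c o f g sp : Option String) (cl : List String) (kd : PySem.Dict String String),
    (ps.foldl pvStep' (pvMk7 k p c o f g sp, cl, kd)).1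
        = pvMk7 k (pvPhyAcc p ps) c (pvLastOr (pvStdVals "order" ps) o)
            (pvLastOr (pvStdVals "family" ps) f) (pvLastOr (pvStdVals "genus" ps) g)
            (pvLastOr (pvStdVals "species" ps) sp)
    ∧ (ps.foldl pvStep' (pvMk7 k p c o f g sp, cl, kd)).2.1 = cl ++ pvStdVals "class" ps
    ∧ (ps.foldl pvStep' (pvMk7 k p c o f g sp, cl, kd)).2.2.get? "regnum"
        = pvLastOr (pvLabVals "regnum" ps) (kd.get? "regnum")
    ∧ (ps.foldl pvStep' (pvMk7 k p c o f g sp, cl, kd)).2.2.get? "superregnum"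
        = pvLastOr (pvLabVals "superregnum" ps) (kd.get? "superregnum") := by
  induction ps with
  | nil =>
    intro k p c o f g sp cl kd
    simp [pvStdVals, pvLabVals, pvLastOr, pvPhyAcc]
  | cons t ps ih =>
    intro k p c o f g sp cl kd
    obtain ⟨s0, l0, v0⟩ := t
    have hvt : pvValid (s0, l0, v0) := hv _ List.mem_cons_self
    have hv' : ∀ x ∈ ps, pvValid x := fun x hx => hv x (List.mem_cons_of_mem _ hx)
    have ih' := ih hv'
    rcases pvValid_cases _ _ _ hvt with ⟨rfl,rfl⟩|⟨rfl,rfl⟩|⟨rfl,rfl⟩|⟨rfl,rfl⟩|⟨rfl,rfl⟩|⟨rfl,rfl⟩|⟨rfl,rfl⟩|⟨rfl,rfl⟩|⟨rfl,rfl⟩|⟨rfl,rfl⟩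
    · -- superregnum / kingdom
      obtain ⟨i1, i2, i3, i4⟩ := ih' k p c o f g sp cl (kd.insert "superregnum" v0)
      simp only [List.foldl_cons, pvStep'_kingdom, pvStdVals_cons, pvLabVals_cons, pvPhyAcc_cons]
      simp [String.reduceEq]
      refine ⟨i1, i2, ?_, ?_⟩
      · rw [i3]; simp [PySem.Dict.get?_insert, String.reduceEq]
      · rw [pvLastOr_cons, i4]; simp [PySem.Dict.get?_insert, String.reduceEq]
    · -- regnum / kingdom
      obtain ⟨i1, i2, i3, i4⟩ := ih' k p c o f g sp cl (kd.insert "regnum" v0)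
      simp only [List.foldl_cons, pvStep'_kingdom, pvStdVals_cons, pvLabVals_cons, pvPhyAcc_cons]
      simp [String.reduceEq]
      refine ⟨i1, i2, ?_, ?_⟩
      · rw [pvLastOr_cons, i3]; simp [PySem.Dict.get?_insert, String.reduceEq]
      · rw [i4]; simp [PySem.Dict.get?_insert, String.reduceEq]
    · -- phylum / phylum
      obtain ⟨i1, i2, i3, i4⟩ := ih' k (some v0) c o f g sp cl kd
      simp only [List.foldl_cons, pvStep'_phylum, pvMk7_get_phylum, Option.getD_some,
        pvMk7_ins_phylum, pvStdVals_cons, pvLabVals_cons, pvPhyAcc_cons]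
      simp [String.reduceEq]
      exact ⟨i1, i2, i3, i4⟩
    · -- subphylum / phylum
      simp only [List.foldl_cons, pvStep'_phylum, pvMk7_get_phylum, Option.getD_some,
        pvStdVals_cons, pvLabVals_cons, pvPhyAcc_cons]
      simp only [String.reduceEq, pvTruthyB_eq, false_or, false_and, if_false]
      by_cases ht : pvTruthyA p = true
      · obtain ⟨i1, i2, i3, i4⟩ := ih' k p c o f g sp cl kd
        simp only [ht]
        simp [String.reduceEq]
        exact ⟨i1, i2, i3, i4⟩
      · obtain ⟨i1, i2, i3, i4⟩ := ih' k (some v0) c o f g sp cl kd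
        simp only [Bool.not_eq_true] at ht
        simp only [ht, pvMk7_ins_phylum]
        simp [String.reduceEq]
        exact ⟨i1, i2, i3, i4⟩
    · -- classis / class
      obtain ⟨i1, i2, i3, i4⟩ := ih' k p c o f g sp (cl ++ [v0]) kd
      simp only [List.foldl_cons, pvStep'_class, pvStdVals_cons, pvLabVals_cons, pvPhyAcc_cons]
      simp [String.reduceEq]
      exact ⟨i1, by rw [i2, List.append_assoc]; rfl, i3, i4⟩
    · -- subclassis / class
      obtain ⟨i1, i2, i3, i4⟩ := ih' k p c o f g sp (cl ++ [v0]) kd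
      simp only [List.foldl_cons, pvStep'_class, pvStdVals_cons, pvLabVals_cons, pvPhyAcc_cons]
      simp [String.reduceEq]
      exact ⟨i1, by rw [i2, List.append_assoc]; rfl, i3, i4⟩
    · -- ordo / order
      obtain ⟨i1, i2, i3, i4⟩ := ih' k p c (some v0) f g sp cl kd
      simp only [List.foldl_cons, pvStep'_order, pvMk7_ins_order, pvStdVals_cons, pvLabVals_cons, pvPhyAcc_cons]
      simp [String.reduceEq]
      exact ⟨by rw [i1, pvLastOr_cons], i2, i3, i4⟩
    · -- familia / family
      obtain ⟨i1, i2, i3, i4⟩ := ih' k p c o (some v0) g sp cl kd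
      simp only [List.foldl_cons, pvStep'_family, pvMk7_ins_family, pvStdVals_cons, pvLabVals_cons, pvPhyAcc_cons]
      simp [String.reduceEq]
      exact ⟨by rw [i1, pvLastOr_cons], i2, i3, i4⟩
    · -- genus / genus
      obtain ⟨i1, i2, i3, i4⟩ := ih' k p c o f (some v0) sp cl kd
      simp only [List.foldl_cons, pvStep'_genus, pvMk7_ins_genus, pvStdVals_cons, pvLabVals_cons, pvPhyAcc_cons]
      simp [String.reduceEq]
      exact ⟨by rw [i1, pvLastOr_cons], i2, i3, i4⟩
    · -- species / species
      obtain ⟨i1, i2, i3, i4⟩ := ih' k p c o f g (some v0) cl kd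
      simp only [List.foldl_cons, pvStep'_species, pvMk7_ins_species, pvStdVals_cons, pvLabVals_cons, pvPhyAcc_cons]
      simp [String.reduceEq]
      exact ⟨by rw [i1, pvLastOr_cons], i2, i3, i4⟩

-- ===== VERDICT (by name: the statement is the Claim_ definition above) =====
theorem parse_wikispecies_rank_hierarchy_spec : Claim_equal_parse_wikispecies_rank_hierarchy := by
  intro l _
  unfold Spec_parse_wikispecies_rank_hierarchy
  unfold parse_wikispecies_rank_hierarchy parse_wikispecies_rank_hierarchy_alt
  dsimp only
  have hfold : ∀ (xs : List String) (init : PySem.Dict String (Option String) × List String × PySem.Dict String String),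
      xs.foldl pvAStep init = (xs.filterMap pvPrepB).foldl pvStep' init := by
    intro xs
    induction xs with
    | nil => intro init; rfl
    | cons a t iht =>
      intro init
      rw [List.foldl_cons, List.filterMap_cons, pvAStep_eq]
      cases pvPrepB a <;> simp [iht]
  rw [hfold]
  have h0 : (PySem.Dict.ofList
      [("kingdom", (none : Option String)), ("phylum", none), ("class", none), ("order", none),
       ("family", none), ("genus", none), ("species", none)]) = pvMk7 none none none none none none none := by decide
  rw [h0]
  have hv : ∀ t ∈ l.filterMap pvPrepB, pvValid t := by
    intro t ht
    rw [List.mem_filterMap] at ht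
    obtain ⟨a, _, ha⟩ := ht
    exact pvPrepB_valid a t ha
  obtain ⟨h1, h2, h3, h4⟩ := pvFold_inv (l.filterMap pvPrepB) hv none none none none none none none [] PySem.Dict.empty
  have eLab : ∀ lab, (l.filterMap pvPrepB).filterMap (fun t => if t.2.1 == lab then some t.2.2 else none) = pvLabVals lab (l.filterMap pvPrepB) := fun _ => rfl
  have eStd : ∀ fl, (l.filterMap pvPrepB).filterMap (fun t => if t.1 == fl then some t.2.2 else none) = pvStdVals fl (l.filterMap pvPrepB) := fun _ => rfl
  have ePhy : (l.filterMap pvPrepB).foldl (fun ph t => if t.2.1 == "phylum" || (t.2.1 == "subphylum" && !pvTruthyB ph) then some t.2.2 else ph) none = pvPhyAcc none (l.filterMap pvPrepB) := rfl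
  have hemp : ∀ k : String, (PySem.Dict.empty : PySem.Dict String String).get? k = none := fun _ => rfl
  simp only [h1, h2, h3, h4, hemp, pvLastOr_none, eLab, eStd, ePhy, List.nil_append, pvLastB]
  cases hav : List.find? (fun cv => PySem.Str.isIn "aves" (PySem.Str.lower cv)) (pvStdVals "class" (List.filterMap pvPrepB l)) with
  | some av =>
    have hpav : PySem.Str.isIn "aves" (PySem.Str.lower av) = true := by
      have := List.find?_some hav
      simpa using this
    have hne : (av == "") = false := by
      by_cases hae : av = ""
      · subst hae; exact absurd hpav (by decide)
      · simp [hae]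
    cases hr : (pvLabVals "regnum" (List.filterMap pvPrepB l)).getLast? with
    | some v => simp [hne, pvMk7_ins_kingdom, pvMk7_ins_class, pvMk7_items]
    | none =>
      cases hs : (pvLabVals "superregnum" (List.filterMap pvPrepB l)).getLast? with
      | some v => simp [hne, pvMk7_ins_kingdom, pvMk7_ins_class, pvMk7_items]
      | none => simp [hne, pvMk7_ins_kingdom, pvMk7_ins_class, pvMk7_items]
  | none =>
    cases hcl : (pvStdVals "class" (List.filterMap pvPrepB l)).getLast? with
    | some w =>
      cases hr : (pvLabVals "regnum" (List.filterMap pvPrepB l)).getLast? with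
      | some v => simp [pvMk7_ins_kingdom, pvMk7_ins_class, pvMk7_items]
      | none =>
        cases hs : (pvLabVals "superregnum" (List.filterMap pvPrepB l)).getLast? with
        | some v => simp [pvMk7_ins_kingdom, pvMk7_ins_class, pvMk7_items]
        | none => simp [pvMk7_ins_kingdom, pvMk7_ins_class, pvMk7_items]
    | none =>
      cases hr : (pvLabVals "regnum" (List.filterMap pvPrepB l)).getLast? with
      | some v => simp [pvMk7_ins_kingdom, pvMk7_ins_class, pvMk7_items]
      | none =>
        cases hs : (pvLabVals "superregnum" (List.filterMap pvPrepB l)).getLast? with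
        | some v => simp [pvMk7_ins_kingdom, pvMk7_ins_class, pvMk7_items]
        | none => simp [pvMk7_ins_kingdom, pvMk7_ins_class, pvMk7_items]
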